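-- pv_equiv track=rewrite | github.com/AruJoy/algorithm-study | 백준/Gold/17140. 이차원 배열과 연산/이차원 배열과 연산.py | column_cal
-- ===== SOURCE A (Python) =====
-- def column_cal(matrix: list):
--     max_length = 0
--     new_matrix = [[matrix[i][j] for i in range(len(matrix))] for j in range(len(matrix[0]))]
--
--     for i in range(len(new_matrix)):
--         new_matrix[i].sort()
--         value = 0
--         count = 0
--         new_items = []
--         for j in range(len(new_matrix[i])):
--             if new_matrix[i][j] == 0:
--                 continue
--             if value == new_matrix[i][j]:
--                 count += 1
--                 continue
--             if value == 0:
--                 value = new_matrix[i][j]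
--                 count += 1
--                 continue
--             new_items.append((count, value))
--             value = new_matrix[i][j]
--             count = 1
--         new_items.append((count, value))
--         new_items.sort()
--         new_row = []
--         for count, value in new_items:
--             new_row.append(value)
--             new_row.append(count)
--         new_items.append((count, value))
--         new_matrix[i] = new_row
--         max_length = max(max_length, len(new_row))
--
--     target_length = min(max_length, 100)
--     for i in range(len(new_matrix)):
--         if len(new_matrix[i]) > 100:
--             new_matrix = new_matrix[0:100]
--             continue
--         if len(new_matrix[i]) < target_length:
--             new_matrix[i] = new_matrix[i] + [0 for _ in range(target_length - len(new_matrix[i]))]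
--     return [[new_matrix[i][j] for i in range(len(new_matrix))] for j in range(len(new_matrix[0]))]
-- ===== SOURCE B (Python) =====
-- def column_cal(matrix: list):
--     # Count each column's nonzero values with a dict in one pass (no transpose
--     # materialisation, no per-column sort of the data); an all-zero column yields
--     # the single pair (0, 0), as the problem's transform does.
--     height = len(matrix)
--     width = len(matrix[0])
--     new_matrix = []
--     max_length = 0
--     for j in range(width):
--         freq = {}
--         for i in range(height):
--             v = matrix[i][j]
--             if v != 0:
--                 freq[v] = freq.get(v, 0) + 1
--         pairs = sorted((c, v) for v, c in freq.items()) or [(0, 0)]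
--         new_row = []
--         for c, v in pairs:
--             new_row.append(v)
--             new_row.append(c)
--         new_matrix.append(new_row)
--         max_length = max(max_length, len(new_row))
--     target_length = min(max_length, 100)
--     for i in range(len(new_matrix)):
--         if len(new_matrix[i]) > 100:
--             new_matrix = new_matrix[0:100]
--             continue
--         if len(new_matrix[i]) < target_length:
--             new_matrix[i] = new_matrix[i] + [0 for _ in range(target_length - len(new_matrix[i]))]
--     return [[new_matrix[i][j] for i in range(len(new_matrix))] for j in range(len(new_matrix[0]))]
-- ===== Notes on version B (the rewrite author's own statement) =====
-- stated objective: alternative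
-- what changed: Per column, B builds a frequency dict of the nonzero values in one pass and sorts only the (count,value) pairs, instead of A's materialised transpose with a full sort of every column followed by a run-length scan; the truncation/padding tail and final transpose are unchanged.
import Mathlib
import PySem

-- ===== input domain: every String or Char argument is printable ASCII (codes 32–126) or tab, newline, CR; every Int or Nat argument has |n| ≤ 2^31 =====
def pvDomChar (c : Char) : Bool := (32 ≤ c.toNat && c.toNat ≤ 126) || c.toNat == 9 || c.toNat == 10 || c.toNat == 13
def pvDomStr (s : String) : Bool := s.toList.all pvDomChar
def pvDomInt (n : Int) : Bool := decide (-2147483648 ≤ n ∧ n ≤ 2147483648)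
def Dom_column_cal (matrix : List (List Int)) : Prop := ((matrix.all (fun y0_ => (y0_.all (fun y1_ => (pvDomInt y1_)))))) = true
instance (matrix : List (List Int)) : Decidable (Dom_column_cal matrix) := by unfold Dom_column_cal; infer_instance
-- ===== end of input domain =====

-- B counts each column's nonzero values with a dict in one pass (no transpose materialisation,
-- no per-column sort of the data) instead of A's sort-then-run-length scan; same tail logic.


-- ===== PORT A =====
-- shared tail: the `target_length`/truncation-padding loop and the final transpose — this code
-- is literally identical in Source A and Source B, so both ports call this one transliteration of it.
def pvTail (nm : List (List Int)) (maxLength : Int) : List (List Int) :=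
  let target := min maxLength 100
  let nm2 := (PySem.List.pyRange 0 (PySem.List.len nm) 1).foldl
    (fun (cur : List (List Int)) i =>
      let row := PySem.List.pyGetD cur i []
      if (100:Int) < PySem.List.len row then PySem.List.slice cur (some 0) (some 100)
      else if PySem.List.len row < target then
        PySem.List.pySetD cur i
          (row ++ (PySem.List.pyRange 0 (target - PySem.List.len row) 1).map (fun _ => (0:Int)))
      else cur) nm
  (PySem.List.pyRange 0 (PySem.List.len (PySem.List.pyGetD nm2 0 [])) 1).map (fun j =>
    (PySem.List.pyRange 0 (PySem.List.len nm2) 1).map (fun i =>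
      PySem.List.pyGetD (PySem.List.pyGetD nm2 i []) j 0))

-- A's per-row body: sort the (column) row, run-length scan skipping zeros, sort the
-- (count,value) pairs (Python tuple order = lex), interleave value,count.
-- (Source A's second `new_items.append((count, value))` after building new_row is dead code:
--  new_items is discarded right after; it is omitted.)
def pvRowA (row : List Int) : List Int :=
  let s := PySem.List.sorted row (fun x => x) false
  let st := (PySem.List.pyRange 0 (PySem.List.len s) 1).foldl
      (fun (st : Int × Int × List (Int × Int)) j =>
        let x := PySem.List.pyGetD s j 0
        if x = 0 then st
        else if st.1 = x then (st.1, st.2.1 + 1, st.2.2)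
        else if st.1 = 0 then (x, st.2.1 + 1, st.2.2)
        else (x, 1, st.2.2 ++ [(st.2.1, st.1)]))
      ((0:Int), (0:Int), ([] : List (Int × Int)))
  let items := st.2.2 ++ [(st.2.1, st.1)]
  let itemsS := PySem.List.sorted items (fun p => toLex p) false
  itemsS.foldl (fun r p => r ++ [p.2, p.1]) []

def column_cal (matrix : List (List Int)) : List (List Int) :=
  let nm0 := (PySem.List.pyRange 0 (PySem.List.len (PySem.List.pyGetD matrix 0 [])) 1).map (fun j =>
      (PySem.List.pyRange 0 (PySem.List.len matrix) 1).map (fun i =>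
        PySem.List.pyGetD (PySem.List.pyGetD matrix i []) j 0))
  let st := (PySem.List.pyRange 0 (PySem.List.len nm0) 1).foldl
     (fun (st : List (List Int) × Int) i =>
        let newRow := pvRowA (PySem.List.pyGetD st.1 i [])
        (PySem.List.pySetD st.1 i newRow, max st.2 (PySem.List.len newRow)))
     (nm0, 0)
  pvTail st.1 st.2

-- ===== PORT B =====
-- B's per-column body: one pass over the column building a frequency dict of nonzero
-- values, pairs = sorted((c,v) for v,c in freq.items()) or [(0,0)], interleave.
def pvRowB (matrix : List (List Int)) (height : Int) (j : Int) : List Int :=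
  let freq := (PySem.List.pyRange 0 height 1).foldl
      (fun (d : PySem.Dict Int Int) i =>
        let v := PySem.List.pyGetD (PySem.List.pyGetD matrix i []) j 0
        if v ≠ 0 then d.insert v (d.getD v 0 + 1) else d) PySem.Dict.empty
  let pairs0 := PySem.List.sorted (freq.items.map (fun vc => (vc.2, vc.1))) (fun p => toLex p) false
  let pairs := if pairs0 = [] then [((0:Int), (0:Int))] else pairs0
  pairs.foldl (fun r p => r ++ [p.2, p.1]) []

def column_cal_alt (matrix : List (List Int)) : List (List Int) :=
  let height := PySem.List.len matrix
  let width := PySem.List.len (PySem.List.pyGetD matrix 0 [])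
  let st := (PySem.List.pyRange 0 width 1).foldl
    (fun (st : List (List Int) × Int) j =>
      let newRow := pvRowB matrix height j
      (st.1 ++ [newRow], max st.2 (PySem.List.len newRow))) ([], 0)
  pvTail st.1 st.2

-- ===== PRECONDITION & SPEC =====
-- Pre_ keeps the natural domain: a nonempty matrix whose rows are at least as long as the first
-- row (shorter rows make A's transpose raise IndexError; entries beyond the first row's width are
-- ignored by both programs). It also excludes matrices in which some column holds more than 50
-- distinct nonzero values: there a transformed row exceeds 100 entries and A's mid-loop
-- row-truncation logic raises IndexError on most shapes (B, sharing that tail code, raises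
-- identically on them, and returns A's value on the rare shapes where A still returns).
def Pre_column_cal (matrix : List (List Int)) : Prop :=
  matrix ≠ [] ∧ matrix.headI ≠ [] ∧
  (∀ row ∈ matrix, matrix.headI.length ≤ row.length) ∧
  (∀ j ∈ List.range matrix.headI.length,
    (PySem.List.dedup ((matrix.map (fun row => row.getD j 0)).filter (fun v => v != 0))).length ≤ 50)
instance (matrix : List (List Int)) : Decidable (Pre_column_cal matrix) := by
  unfold Pre_column_cal; infer_instance

def pvWitness_column_cal : List (List Int) := [[1, 2, 0], [3, 1, 0]]

def Spec_column_cal (matrix : List (List Int)) (out : List (List Int)) : Prop := out = column_cal_alt matrix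
instance (matrix : List (List Int)) (out : List (List Int)) : Decidable (Spec_column_cal matrix out) := by unfold Spec_column_cal; infer_instance

-- ===== CLAIM (what is proved, stated in full; the proofs are below) =====
def Claim_equal_column_cal : Prop := ∀ (matrix : List (List Int)), Dom_column_cal matrix → Pre_column_cal matrix → Spec_column_cal matrix (column_cal matrix)

-- ===== LEMMAS AND PROOFS =====

def pvH (st : Int × Int × List (Int × Int)) (x : Int) : Int × Int × List (Int × Int) :=
  if x = 0 then st
  else if st.1 = x then (st.1, st.2.1 + 1, st.2.2)
  else if st.1 = 0 then (x, st.2.1 + 1, st.2.2)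
  else (x, 1, st.2.2 ++ [(st.2.1, st.1)])
def pvFin (st : Int × Int × List (Int × Int)) : List (Int × Int) := st.2.2 ++ [(st.2.1, st.1)]


def pvRowBc (col : List Int) : List Int :=
  let t := col.filter (fun v => v != 0)
  let pairs0 := PySem.List.sorted ((PySem.Set.ofList t).map (fun k => ((t.count k : Int), k))) (fun p => toLex p) false
  let pairs := if pairs0 = [] then [((0:Int), (0:Int))] else pairs0
  pairs.foldl (fun r p => r ++ [p.2, p.1]) []

def pvRowBcount (col : List Int) : PySem.Dict Int Int :=
  col.foldl (fun (d : PySem.Dict Int Int) v => if v ≠ 0 then d.insert v (d.getD v 0 + 1) else d) PySem.Dict.empty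

lemma pvFoldlAdd_filter (l : List Int) : ∀ (s : List Int) (x : Int), x ∈ s →
    List.foldl PySem.Set.add s l = List.foldl PySem.Set.add s (l.filter (fun y => y != x)) := by
  induction l with
  | nil => intro s x _; rfl
  | cons y l ih =>
    intro s x hx
    by_cases hyx : y = x
    · subst hyx
      have hc : PySem.Set.add s y = s := by
        simp [PySem.Set.add, hx]
      simp [hc, ih s y hx]
    · have : (y != x) = true := by simp [hyx]
      simp only [List.foldl_cons, List.filter_cons, this, if_pos]
      apply ih
      simp [PySem.Set.add]
      split
      · exact hx
      · simp [hx]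
lemma pvFoldlAdd_prefix (l : List Int) : ∀ (pre s : List Int), (∀ y ∈ l, y ∉ pre) →
    List.foldl PySem.Set.add (pre ++ s) l = pre ++ List.foldl PySem.Set.add s l := by
  induction l with
  | nil => intro pre s _; rfl
  | cons y l ih =>
    intro pre s h
    have hy : y ∉ pre := h y (by simp)
    have : PySem.Set.add (pre ++ s) y = pre ++ PySem.Set.add s y := by
      simp only [PySem.Set.add]
      by_cases hs : y ∈ s
      · simp [hs, hy]
      · simp [hs, hy]
    simp only [List.foldl_cons, this]
    exact ih pre (PySem.Set.add s y) (fun z hz => h z (by simp [hz]))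
lemma pvOfListCons (x : Int) (l : List Int) :
    PySem.Set.ofList (x :: l) = x :: PySem.Set.ofList (l.filter (fun y => y != x)) := by
  have h1 : PySem.Set.ofList (x :: l) = List.foldl PySem.Set.add [x] l := rfl
  rw [h1, pvFoldlAdd_filter l [x] x (by simp)]
  have := pvFoldlAdd_prefix (l.filter (fun y => y != x)) [x] []
      (by intro y hy; simp at hy ⊢; exact hy.2)
  simpa [PySem.Set.ofList] using this


lemma pvRun (u : List Int) : ∀ (v c : Int) (items : List (Int × Int)),
    u.Pairwise (· ≤ ·) → (∀ x ∈ u, x ≠ 0) → v ≠ 0 → (∀ x ∈ u, v ≤ x) →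
    pvFin (u.foldl pvH (v, c, items)) =
      items ++ (v :: PySem.Set.ofList (u.filter (fun y => y != v))).map
        (fun k => (if k = v then c + (u.count v : Int) else (u.count k : Int), k)) := by
  induction u with
  | nil => intro v c items _ _ _ _; simp [pvFin]
  | cons x rest ih =>
    intro v c items hp h0 hv hle
    have hx0 : x ≠ 0 := h0 x (by simp)
    have hrest_ge_x : ∀ y ∈ rest, x ≤ y := by
      intro y hy; exact (List.pairwise_cons.mp hp).1 y hy
    have hp' := (List.pairwise_cons.mp hp).2
    have h0' : ∀ y ∈ rest, y ≠ 0 := fun y hy => h0 y (by simp [hy])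
    by_cases hvx : v = x
    · subst hvx
      have hstep : pvH (v, c, items) v = (v, c + 1, items) := by simp [pvH, hv]
      rw [List.foldl_cons, hstep, ih v (c + 1) items hp' h0' hv hrest_ge_x]
      have hfilter : (v :: rest).filter (fun y => y != v) = rest.filter (fun y => y != v) := by
        simp
      rw [hfilter]
      congr 1
      apply List.map_congr_left
      intro k hk
      by_cases hkv : k = v
      · subst hkv; simp; ring
      · have hkv2 : ¬ v = k := fun e => hkv e.symm
        simp [hkv, hkv2]
    · have hvltx : v < x := lt_of_le_of_ne (hle x (by simp)) hvx
      have hstep : pvH (v, c, items) x = (x, 1, items ++ [(c, v)]) := by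
        simp [pvH, hx0, hv, fun h => hvx h]
      rw [List.foldl_cons, hstep, ih x 1 (items ++ [(c, v)]) hp' h0' hx0 hrest_ge_x]
      have hvnot : ∀ y ∈ (x :: rest), v ≠ y := by
        intro y hy
        rcases List.mem_cons.mp hy with h | h
        · exact fun e => hvx (e.trans h)
        · exact ne_of_lt (lt_of_lt_of_le hvltx (hrest_ge_x y h))
      have hcount0 : (x :: rest).count v = 0 := by
        rw [List.count_eq_zero]
        intro hmem; exact hvnot v hmem rfl
      have hfilter : (x :: rest).filter (fun y => y != v) = x :: rest := by
        rw [List.filter_eq_self]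
        intro y hy; simpa using (hvnot y hy).symm
      rw [hfilter, pvOfListCons]
      simp only [List.map_cons, List.append_assoc, List.singleton_append]
      congr 1
      congr 1
      · simp [hcount0]
      congr 1
      · have hxnv : ¬ x = v := fun e => hvx e.symm
        simp [hxnv]
        omega
      apply List.map_congr_left
      intro k hk
      have hkmem := (PySem.Set.mem_ofList _ _).mp hk
      have hk' : k ∈ rest := (List.mem_filter.mp hkmem).1
      have hknex : k ≠ x := by simpa using (List.mem_filter.mp hkmem).2
      have hknev : k ≠ v := fun e => (hvnot k (by simp [hk'])) e.symm
      simp [hknev, hknex, Ne.symm hknex]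
lemma pvScanTop (u : List Int) (hp : u.Pairwise (· ≤ ·)) (h0 : ∀ x ∈ u, x ≠ 0) :
    pvFin (u.foldl pvH ((0:Int), (0:Int), ([] : List (Int × Int)))) =
      if u = [] then [((0:Int), (0:Int))]
      else (PySem.Set.ofList u).map (fun k => ((u.count k : Int), k)) := by
  cases u with
  | nil => rfl
  | cons x rest =>
    have hx0 : x ≠ 0 := h0 x (by simp)
    have hstep : pvH ((0:Int), (0:Int), ([] : List (Int × Int))) x = (x, 1, []) := by
      simp [pvH, hx0, Ne.symm hx0]
    rw [List.foldl_cons, hstep,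
      pvRun rest x 1 [] (List.pairwise_cons.mp hp).2
        (fun y hy => h0 y (by simp [hy])) hx0 (List.pairwise_cons.mp hp).1]
    simp only [if_neg (List.cons_ne_nil x rest), List.nil_append]
    rw [pvOfListCons]
    simp only [List.map_cons]
    congr 1
    · simp
      omega
    apply List.map_congr_left
    intro k hk
    have hkmem := (PySem.Set.mem_ofList _ _).mp hk
    have hknex : k ≠ x := by simpa using (List.mem_filter.mp hkmem).2
    simp [hknex, Ne.symm hknex]

lemma pvFilterSorted (col : List Int) :
    (PySem.List.sorted col (fun x => x) false).filter (fun y => y != 0) =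
      PySem.List.sorted (col.filter (fun y => y != 0)) (fun x => x) false := by
  have hperm : ((PySem.List.sorted col (fun x => x) false).filter (fun y => y != 0)).Perm
      (PySem.List.sorted (col.filter (fun y => y != 0)) (fun x => x) false) :=
    ((PySem.List.sorted_perm col (fun x => x) false).filter _).trans
      (PySem.List.sorted_perm _ (fun x => x) false).symm
  exact List.Perm.eq_of_pairwise (le := (· ≤ ·))
    (fun a b _ _ h1 h2 => le_antisymm h1 h2)
    ((PySem.List.sorted_pairwise col (fun x => x)).sublist (List.filter_sublist))
    (PySem.List.sorted_pairwise _ (fun x => x)) hperm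

lemma pvRowB_eq (matrix : List (List Int)) (j : Int) :
    pvRowB matrix (PySem.List.len matrix) j =
      pvRowBc (matrix.map (fun row => PySem.List.pyGetD row j 0)) := by
  unfold pvRowB pvRowBc
  have h1 : ((PySem.List.pyRange 0 (PySem.List.len matrix)).foldl
      (fun (d : PySem.Dict Int Int) i =>
        let v := PySem.List.pyGetD (PySem.List.pyGetD matrix i []) j 0
        if v ≠ 0 then d.insert v (d.getD v 0 + 1) else d) PySem.Dict.empty)
      = matrix.foldl (fun (d : PySem.Dict Int Int) row =>
          let v := PySem.List.pyGetD row j 0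
          if v ≠ 0 then d.insert v (d.getD v 0 + 1) else d) PySem.Dict.empty :=
    PySem.List.foldl_pyRange_zero_pyGetD matrix []
      (fun (d : PySem.Dict Int Int) row =>
        let v := PySem.List.pyGetD row j 0
        if v ≠ 0 then d.insert v (d.getD v 0 + 1) else d) PySem.Dict.empty
  dsimp only
  rw [h1, ← List.foldl_map (f := fun row => PySem.List.pyGetD row j 0)
      (g := fun (d : PySem.Dict Int Int) v => if v ≠ 0 then d.insert v (d.getD v 0 + 1) else d)]
  have h2 : (matrix.map (fun row => PySem.List.pyGetD row j 0)).foldl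
      (fun (d : PySem.Dict Int Int) v => if v ≠ 0 then d.insert v (d.getD v 0 + 1) else d)
      PySem.Dict.empty
      = PySem.Dict.counter ((matrix.map (fun row => PySem.List.pyGetD row j 0)).filter (fun v => v != 0)) := by
    rw [← PySem.Dict.foldl_insert_getD_add_one_eq_counter, List.foldl_filter]
    congr 1
    funext d v
    by_cases hv : v = 0 <;> simp [hv]
  rw [h2, PySem.Dict.items_counter, List.map_map]
  rfl

lemma pvRowA_eq (col : List Int) : pvRowA col = pvRowBc col := by
  unfold pvRowA pvRowBc
  dsimp only
  have h1 : ((PySem.List.pyRange 0 (PySem.List.len (PySem.List.sorted col (fun x => x) false))).foldl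
      (fun (st : Int × Int × List (Int × Int)) j =>
        let x := PySem.List.pyGetD (PySem.List.sorted col (fun x => x) false) j 0
        if x = 0 then st
        else if st.1 = x then (st.1, st.2.1 + 1, st.2.2)
        else if st.1 = 0 then (x, st.2.1 + 1, st.2.2)
        else (x, 1, st.2.2 ++ [(st.2.1, st.1)]))
      ((0:Int), (0:Int), ([] : List (Int × Int))))
      = (PySem.List.sorted col (fun x => x) false).foldl pvH ((0:Int), (0:Int), ([] : List (Int × Int))) :=
    PySem.List.foldl_pyRange_zero_pyGetD (PySem.List.sorted col (fun x => x) false) 0 pvH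
      ((0:Int), (0:Int), ([] : List (Int × Int)))
  rw [h1]
  have hzf : (fun (st : Int × Int × List (Int × Int)) (y : Int) => if (y != 0) = true then pvH st y else st) = pvH := by
    funext st y
    by_cases hy : y = 0 <;> simp [pvH, hy]
  have h2 : (PySem.List.sorted col (fun x => x) false).foldl pvH ((0:Int), (0:Int), ([] : List (Int × Int)))
      = ((PySem.List.sorted col (fun x => x) false).filter (fun y => y != 0)).foldl pvH
          ((0:Int), (0:Int), ([] : List (Int × Int))) := by
    rw [List.foldl_filter, hzf]
  rw [h2, pvFilterSorted]
  set t := col.filter (fun y => y != 0) with ht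
  set u := PySem.List.sorted t (fun x => x) false with hu
  have hscan : pvFin (u.foldl pvH ((0:Int), (0:Int), ([] : List (Int × Int))))
      = if u = [] then [((0:Int), (0:Int))]
        else (PySem.Set.ofList u).map (fun k => ((u.count k : Int), k)) :=
    pvScanTop u (PySem.List.sorted_pairwise t (fun x => x))
      (by
        intro x hx
        have := (PySem.List.sorted_perm t (fun x => x) false).mem_iff.mp hx
        simpa using (List.mem_filter.mp this).2)
  unfold pvFin at hscan
  by_cases htnil : t = []
  · have hunil : u = [] := by rw [hu, htnil]; rfl
    rw [hunil] at hscan ⊢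
    simp only  at hscan
    simp only [List.foldl_nil] at hscan ⊢
    rw [hscan]
    have : PySem.Set.ofList t = [] := by rw [htnil]; rfl
    rw [this]
    rfl
  · have hunil : u ≠ [] := by
      rw [hu]; simpa [PySem.List.sorted_eq_nil_iff] using htnil
    rw [if_neg hunil] at hscan
    have hperm_ut : u.Perm t := PySem.List.sorted_perm t (fun x => x) false
    have hfun : (fun k => ((u.count k : Int), k)) = (fun k => ((t.count k : Int), k)) :=
      funext fun k => by rw [hperm_ut.count_eq]
    have hofl : (PySem.Set.ofList u).Perm (PySem.Set.ofList t) :=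
      (List.perm_ext_iff_of_nodup (PySem.Set.nodup_ofList u) (PySem.Set.nodup_ofList t)).mpr
        (fun a => by rw [PySem.Set.mem_ofList, PySem.Set.mem_ofList, hperm_ut.mem_iff])
    have hlistperm : ((PySem.Set.ofList u).map (fun k => ((u.count k : Int), k))).Perm
        ((PySem.Set.ofList t).map (fun k => ((t.count k : Int), k))) := by
      rw [hfun]; exact hofl.map _
    have hsorted_eq : PySem.List.sorted ((PySem.Set.ofList u).map (fun k => ((u.count k : Int), k))) (fun p => toLex p) false
        = PySem.List.sorted ((PySem.Set.ofList t).map (fun k => ((t.count k : Int), k))) (fun p => toLex p) false :=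
      PySem.List.sorted_eq_sorted_of_perm _ _ _ (Equiv.injective toLex) hlistperm
    have hne : PySem.List.sorted ((PySem.Set.ofList t).map (fun k => ((t.count k : Int), k))) (fun p => toLex p) false ≠ [] := by
      obtain ⟨a, ha⟩ := List.exists_mem_of_ne_nil t htnil
      simp only [ne_eq, PySem.List.sorted_eq_nil_iff, List.map_eq_nil_iff]
      intro h
      exact List.ne_nil_of_mem ((PySem.Set.mem_ofList t a).mpr ha) h
    rw [hscan, hsorted_eq, if_neg hne]
lemma pvPhase2Aux (f : List Int → List Int) (l : List (List Int)) :
    ∀ (k : Nat) (m0 : Int), k ≤ l.length →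
    (PySem.List.pyRange 0 (k : Int)).foldl
      (fun (st : List (List Int) × Int) i =>
        (PySem.List.pySetD st.1 i (f (PySem.List.pyGetD st.1 i [])),
         max st.2 (PySem.List.len (f (PySem.List.pyGetD st.1 i []))))) (l, m0)
    = ((l.take k).map f ++ l.drop k, (((l.take k).map f).map PySem.List.len).foldl max m0) := by
  intro k
  induction k with
  | zero => intro m0 _; simp [PySem.List.pyRange_one_eq_nil]
  | succ k ih =>
    intro m0 hk
    have hk' : k < l.length := hk
    have hcast : ((k + 1 : Nat) : Int) = (k : Int) + 1 := by push_cast; ring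
    rw [hcast, PySem.List.pyRange_one_succ_right (by positivity), List.foldl_append,
      ih m0 (le_of_lt hk')]
    set A := (l.take k).map f with hA
    have hAlen : A.length = k := by simp [hA, le_of_lt hk']
    have hget : PySem.List.pyGetD (A ++ l.drop k) (k : Int) [] = l[k] := by
      rw [PySem.List.pyGetD_natCast, List.getD,
        List.getElem?_append_right (show A.length ≤ k by omega),
        show k - A.length = 0 by omega, List.drop_eq_getElem_cons hk']
      simp [List.getElem?_eq_getElem hk']
    have hset : PySem.List.pySetD (A ++ l.drop k) (k : Int) (f l[k])
        = (l.take (k+1)).map f ++ l.drop (k+1) := by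
      unfold PySem.List.pySetD
      rw [PySem.List.pySet?_natCast _ _ _ (by simp [hAlen, hk'])]
      simp only [Option.getD_some]
      rw [List.set_append, if_neg (by omega), show k - A.length = 0 by omega,
        List.drop_eq_getElem_cons hk']
      simp only [List.set_cons_zero]
      rw [List.take_succ_eq_append_getElem hk', List.map_append]
      simp [hA]
    simp only [List.foldl_cons, List.foldl_nil, hget, hset]
    congr 1
    rw [List.take_succ_eq_append_getElem hk', List.map_append, List.map_append, List.map_map,
      List.foldl_append]
    simp
lemma pvPhase2 (f : List Int → List Int) (l : List (List Int)) :
    (PySem.List.pyRange 0 (PySem.List.len l)).foldl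
      (fun (st : List (List Int) × Int) i =>
        (PySem.List.pySetD st.1 i (f (PySem.List.pyGetD st.1 i [])),
         max st.2 (PySem.List.len (f (PySem.List.pyGetD st.1 i []))))) (l, 0)
    = (l.map f, ((l.map f).map PySem.List.len).foldl max 0) := by
  have := pvPhase2Aux f l l.length 0 (le_refl _)
  simpa [PySem.List.len] using this
lemma pvBmainAux (g : Int → List Int) (n : Nat) :
    ∀ (acc : List (List Int)) (m0 : Int),
    (PySem.List.pyRange 0 (n : Int)).foldl
      (fun (st : List (List Int) × Int) j => (st.1 ++ [g j], max st.2 (PySem.List.len (g j)))) (acc, m0)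
    = (acc ++ ((PySem.List.pyRange 0 (n : Int)).map g),
       ((((PySem.List.pyRange 0 (n : Int)).map g)).map PySem.List.len).foldl max m0) := by
  induction n with
  | zero => intro acc m0; simp [PySem.List.pyRange_one_eq_nil]
  | succ n ih =>
    intro acc m0
    have hcast : ((n + 1 : Nat) : Int) = (n : Int) + 1 := by push_cast; ring
    rw [hcast, PySem.List.pyRange_one_succ_right (by positivity), List.foldl_append, ih acc m0]
    simp [List.foldl_append]
lemma pvCol (matrix : List (List Int)) (j : Int) :
    (PySem.List.pyRange 0 (PySem.List.len matrix)).map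
        (fun i => PySem.List.pyGetD (PySem.List.pyGetD matrix i []) j 0)
      = matrix.map (fun row => PySem.List.pyGetD row j 0) := by
  rw [show (fun i => PySem.List.pyGetD (PySem.List.pyGetD matrix i []) j 0)
      = ((fun row => PySem.List.pyGetD row j 0) ∘ (fun i => PySem.List.pyGetD matrix i [])) from rfl,
    ← List.map_map, PySem.List.map_pyGetD_pyRange_zero]

lemma pvEq (matrix : List (List Int)) : column_cal matrix = column_cal_alt matrix := by
  unfold column_cal column_cal_alt
  dsimp only
  rw [pvPhase2 pvRowA]
  have hn : PySem.List.len (PySem.List.pyGetD matrix 0 []) = ((PySem.List.pyGetD matrix 0 []).length : Int) := by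
    simp
  rw [hn, pvBmainAux (fun j => pvRowB matrix (PySem.List.len matrix) j) (PySem.List.pyGetD matrix 0 []).length]
  have hmap : ((PySem.List.pyRange 0 ((PySem.List.pyGetD matrix 0 []).length : Int)).map
        (fun j => (PySem.List.pyRange 0 (PySem.List.len matrix)).map
          (fun i => PySem.List.pyGetD (PySem.List.pyGetD matrix i []) j 0))).map pvRowA
      = (PySem.List.pyRange 0 ((PySem.List.pyGetD matrix 0 []).length : Int)).map
          (fun j => pvRowB matrix (PySem.List.len matrix) j) := by
    rw [List.map_map]
    apply List.map_congr_left
    intro j _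
    simp only [Function.comp]
    rw [pvCol, pvRowB_eq, ← pvRowA_eq]
  rw [hmap]
  simp

-- ===== VERDICT (by name: the statement is the Claim_ definition above) =====
theorem column_cal_spec : Claim_equal_column_cal := by
  intro matrix _ _
  unfold Spec_column_cal
  exact pvEq matrix
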